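-- pv_equiv track=rewrite | github.com/leejaerim/Algorithm | Programmers/불량사용자/불량사용자.py | solution
-- ===== SOURCE A (Python) =====
-- from itertools import combinations
--
-- def solution(event:list, banned:list)->int:
--     _set = {}
--     #문자열 수 및 banned_id에 해당하는지 체크
--     for i in banned :
--         if _set.get(i) is None:
--             _set[i] = (1,[])
--         else:
--             _set[i] = (_set[i][0]+1, _set[i][1])
--         for j in event:
--             if len(i) == len(j):
--                 for k in range(len(j)):
--                     if i[k] != '*' and i[k] != j[k]:
--                         break
--                 else:
--                     _set[i][1].append(j)
--     # dfs 백트래킹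
--     target = []
--     def dfs(keys:list,index:int, ans:list, _set:set,target:list):
--         if index > len(keys)-1:
--             ans = set(ans)
--             if ans not in target:
--                 target.append(ans)
--         else:
--             k, next = _set.get(keys[index])
--             next = list(set(next))
--             for i in ans :
--                     if i in next:
--                         next.remove(i)
--             if k != len(next): # k 값만큼 골라야하는 조합구간
--                 for i in combinations(next,k):
--                     dfs(keys,index+1,ans+list(i),_set,target)
--             elif len(next) != 0:
--                     dfs(keys,index+1,ans+next,_set,target)
--     dfs(list(_set.keys()),0,[],_set,target)
--     return len(target)
-- ===== SOURCE B (Python) =====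
-- from itertools import product
--
-- def solution(event: list, banned: list) -> int:
--     cands = []
--     for b in banned:
--         cands.append({e for e in event
--                       if len(e) == len(b)
--                       and all(bc == '*' or bc == ec for bc, ec in zip(b, e))})
--     results = set()
--     for t in product(*cands):
--         if len(set(t)) == len(banned):
--             results.add(frozenset(t))
--     return len(results)
-- ===== Notes on version B (the rewrite author's own statement) =====
-- stated objective: simpler
-- what changed: Replaces A's count-grouping dict plus pruning backtracking with itertools.combinations by a direct enumeration: per-pattern candidate sets, itertools.product over them, keep tuples with pairwise-distinct users, count distinct frozensets.
import Mathlib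
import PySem

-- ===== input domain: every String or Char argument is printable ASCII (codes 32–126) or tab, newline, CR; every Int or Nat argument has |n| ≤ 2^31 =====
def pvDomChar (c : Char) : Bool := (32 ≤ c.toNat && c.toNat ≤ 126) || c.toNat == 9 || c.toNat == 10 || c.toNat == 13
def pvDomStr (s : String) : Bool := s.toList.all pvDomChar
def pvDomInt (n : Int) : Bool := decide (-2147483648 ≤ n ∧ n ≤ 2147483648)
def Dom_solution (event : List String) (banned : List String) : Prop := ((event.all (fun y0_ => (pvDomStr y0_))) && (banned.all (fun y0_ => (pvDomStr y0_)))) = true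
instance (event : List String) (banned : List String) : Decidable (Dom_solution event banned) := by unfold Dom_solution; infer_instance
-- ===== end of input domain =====

-- B replaces A's dict-grouping + pruning backtracking by candidate sets, itertools.product and
-- a distinctness filter over frozensets (objective: simpler; same exact return value).


-- ===== PORT A =====
-- inner for-else over range(len(j)) with break, transcribed as paired structural recursion
-- (only reached under A's `len(i) == len(j)` guard, where the two lists have equal length)
def pvMatchA : List Char → List Char → Bool
  | _, [] => true
  | [], _ :: _ => true
  | ic :: is, jc :: js => if ic ≠ '*' ∧ ic ≠ jc then false else pvMatchA is js

-- _set-building loop body for one banned pattern i: the inner `for j in event` append loop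
def pvInnerA (event : List String) (i : String)
    (d : PySem.Dict String (Int × List String)) : PySem.Dict String (Int × List String) :=
  event.foldl (fun d j =>
    if PySem.Str.len i = PySem.Str.len j then
      (if pvMatchA i.toList j.toList then d.modify i (0, []) (fun p => (p.1, p.2 ++ [j])) else d)
    else d) d

-- the whole `for i in banned` loop
def pvBuildA (event : List String) (banned : List String) :
    PySem.Dict String (Int × List String) :=
  banned.foldl (fun d i =>
    pvInnerA event i
      (match d.get? i with
       | none => d.insert i (1, [])
       | some p => d.insert i (p.1 + 1, p.2))) PySem.Dict.empty

-- itertools.combinations(xs, k) in its emission order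
def pvCombA : Nat → List String → List (List String)
  | 0, _ => [[]]
  | _ + 1, [] => []
  | k + 1, x :: xs => (pvCombA k xs).map (fun c => x :: c) ++ pvCombA (k + 1) xs

-- dfs(keys, index, ans, _set, target): recursion on the keys still to process (keys[index:]);
-- `ans = set(ans); if ans not in target` is set-valued membership, i.e. comparison by Set.equal;
-- `k, next = _set.get(keys[index])` is total here because keys come from the dict (getD for totality)
def pvDfsA (d : PySem.Dict String (Int × List String)) :
    List String → List String → List (PySem.Set String) → List (PySem.Set String)
  | [], ans, target =>
      let a := PySem.Set.ofList ans
      if target.any (fun s => PySem.Set.equal s a) then target else target ++ [a]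
  | key :: rest, ans, target =>
      let p := d.getD key (0, [])
      let next := PySem.Set.ofList p.2
      -- `for i in ans: if i in next: next.remove(i)`
      let next := ans.foldl (fun n i =>
        if PySem.Set.contains n i then ((PySem.Set.remove? n i).getD n) else n) next
      if p.1 ≠ (next.length : Int) then
        (pvCombA p.1.toNat next).foldl (fun t c => pvDfsA d rest (ans ++ c) t) target
      else if next.length ≠ 0 then pvDfsA d rest (ans ++ next) target
      else target

def solution (event : List String) (banned : List String) : Int :=
  let d := pvBuildA event banned
  ((pvDfsA d d.keys [] []).length : Int)

-- ===== PORT B =====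
-- banned-pattern match test of Source B's set comprehension
def pvMatchB (b e : String) : Bool :=
  PySem.Str.len b = PySem.Str.len e &&
    (b.toList.zip e.toList).all (fun p => p.1 == '*' || p.1 == p.2)

-- per-occurrence candidate sets
def pvCandsB (event : List String) (banned : List String) : List (PySem.Set String) :=
  banned.map (fun b => PySem.Set.ofList (event.filter (fun e => pvMatchB b e)))

-- itertools.product(*cands) in emission order (rightmost factor varies fastest)
def pvProdB : List (List String) → List (List String)
  | [] => [[]]
  | c :: cs => c.flatMap (fun u => (pvProdB cs).map (fun t => u :: t))

-- `results.add(frozenset(t))`: a Python set of frozensets — frozenset is PySem.Set String,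
-- membership in results is frozenset equality, i.e. Set.equal
def pvAddFroB (r : List (PySem.Set String)) (s : PySem.Set String) : List (PySem.Set String) :=
  if r.any (fun t => PySem.Set.equal t s) then r else r ++ [s]

def solution_alt (event : List String) (banned : List String) : Int :=
  let cands := pvCandsB event banned
  let results := (pvProdB cands).foldl (fun r t =>
    if (PySem.Set.ofList t).length = banned.length then pvAddFroB r (PySem.Set.ofList t) else r) []
  (results.length : Int)

-- ===== PRECONDITION & SPEC =====
def Spec_solution (event : List String) (banned : List String) (out : Int) : Prop := out = solution_alt event banned
instance (event : List String) (banned : List String) (out : Int) : Decidable (Spec_solution event banned out) := by unfold Spec_solution; infer_instance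

-- ===== CLAIM (what is proved, stated in full; the proofs are below) =====
def Claim_equal_solution : Prop := ∀ (event : List String) (banned : List String), Dom_solution event banned → Spec_solution event banned (solution event banned)

-- ===== LEMMAS AND PROOFS =====

-- abstraction: the value of a collected "set" is its Finset of members
def pvAsF (r : List (List String)) : Finset (Finset String) := (r.map List.toFinset).toFinset

def pvPNe (r : List (List String)) : Prop := r.Pairwise (fun s t => s.toFinset ≠ t.toFinset)

-- the common combinatorial spec: grouped slots (candidate set, multiplicity)
def pvTG : List (Finset String × ℕ) → Finset String → Finset (Finset String)
  | [], A => {A}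
  | (c, k) :: rest, A => (Finset.powersetCard k (c \ A)).biUnion (fun s => pvTG rest (A ∪ s))

-- A's per-pattern filter condition, and its agreement with B's
def pvCondA (i j : String) : Bool := decide (PySem.Str.len i = PySem.Str.len j) && pvMatchA i.toList j.toList

theorem pvMatchA_eq_zip (il jl : List Char) :
    pvMatchA il jl = (il.zip jl).all (fun p => p.1 == '*' || p.1 == p.2) := by
  induction il generalizing jl with
  | nil => cases jl <;> simp [pvMatchA]
  | cons ic is ih =>
    cases jl with
    | nil => simp [pvMatchA]
    | cons jc js =>
      by_cases h : ic ≠ '*' ∧ ic ≠ jc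
      · simp [pvMatchA, h]
      · rw [not_and_or, not_not, not_not] at h
        rcases h with h | h <;> simp [pvMatchA, h, ih]

theorem pvCondA_eq_matchB (i j : String) : pvCondA i j = pvMatchB i j := by
  simp [pvCondA, pvMatchB, pvMatchA_eq_zip]

-- ---- dict-building lemmas ----
theorem pvInnerA_getD (event : List String) (i x : String) (d : PySem.Dict String (Int × List String)) :
    (pvInnerA event i d).getD x (0, []) =
      if x = i then ((d.getD i (0, [])).1, (d.getD i (0, [])).2 ++ event.filter (fun j => pvCondA i j))
      else d.getD x (0, []) := by
  induction event generalizing d with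
  | nil =>
    simp only [pvInnerA, List.foldl_nil, List.filter_nil, List.append_nil]
    split_ifs with h
    · subst h; rfl
    · rfl
  | cons e ev ih =>
    rw [show pvInnerA (e :: ev) i d = pvInnerA ev i
        (if PySem.Str.len i = PySem.Str.len e then
          (if pvMatchA i.toList e.toList then d.modify i (0, []) (fun p => (p.1, p.2 ++ [e])) else d)
        else d) from rfl, ih]
    have hstep : ∀ y, ((if PySem.Str.len i = PySem.Str.len e then
          (if pvMatchA i.toList e.toList then d.modify i (0, []) (fun p => (p.1, p.2 ++ [e])) else d)
        else d).getD y (0, []))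
        = if y = i ∧ pvCondA i e = true then ((d.getD i (0, [])).1, (d.getD i (0, [])).2 ++ [e])
          else d.getD y (0, []) := by
      intro y
      by_cases h1 : PySem.Str.len i = PySem.Str.len e
      · by_cases h2 : pvMatchA i.toList e.toList = true
        · have h1' : i.length = e.length := by
            have := h1; simp only [PySem.Str.len_eq] at this; exact_mod_cast this
          have hc : pvCondA i e = true := by simp [pvCondA, h1', h2]
          rw [if_pos h1, if_pos h2, PySem.Dict.getD_modify]
          by_cases hy : y = i
          · rw [if_pos hy, if_pos ⟨hy, hc⟩]
          · rw [if_neg hy, if_neg (by tauto)]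
        · have hc : pvCondA i e = false := by simp [pvCondA, h2]
          rw [if_pos h1, if_neg h2, if_neg (by simp [hc])]
      · have h1' : ¬ i.length = e.length := by
          intro hh; apply h1; simp only [PySem.Str.len_eq]; exact_mod_cast hh
        have hc : pvCondA i e = false := by simp [pvCondA, h1']
        rw [if_neg h1, if_neg (by simp [hc])]
    by_cases hx : x = i
    · subst hx
      rw [if_pos rfl, if_pos rfl, hstep x]
      by_cases hce : pvCondA x e = true
      · rw [if_pos ⟨rfl, hce⟩, List.filter_cons, if_pos hce]
        simp [List.append_assoc]
      · rw [if_neg (by tauto), List.filter_cons, if_neg (by simp [hce])]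
    · rw [if_neg hx, if_neg hx, hstep x, if_neg (by tauto)]

theorem pvInnerA_keys (event : List String) (i : String) (d : PySem.Dict String (Int × List String))
    (h : d.contains i = true) : (pvInnerA event i d).keys = d.keys := by
  induction event generalizing d with
  | nil => rfl
  | cons e ev ih =>
    rw [show pvInnerA (e :: ev) i d = pvInnerA ev i
        (if PySem.Str.len i = PySem.Str.len e then
          (if pvMatchA i.toList e.toList then d.modify i (0, []) (fun p => (p.1, p.2 ++ [e])) else d)
        else d) from rfl]
    split_ifs with h1 h2
    · rw [ih _ (by rw [PySem.Dict.contains_modify]; simp),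
        PySem.Dict.keys_modify, PySem.Dict.keys_insert_of_contains _ _ h]
    · exact ih d h
    · exact ih d h

-- one outer-loop step of A's build
def pvStepA (event : List String) (d : PySem.Dict String (Int × List String)) (i : String) :
    PySem.Dict String (Int × List String) :=
  pvInnerA event i
    (match d.get? i with
     | none => d.insert i (1, [])
     | some p => d.insert i (p.1 + 1, p.2))

theorem pvBuildA_eq_foldl (event banned : List String) :
    pvBuildA event banned = banned.foldl (pvStepA event) PySem.Dict.empty := by
  rfl

theorem pvBuildFold_getD (event : List String) : ∀ (bs : List String) (d : PySem.Dict String (Int × List String)) (x : String),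
    (bs.foldl (pvStepA event) d).getD x (0, []) =
      ((d.getD x (0, [])).1 + bs.count x,
       (d.getD x (0, [])).2 ++ (List.replicate (bs.count x) (event.filter (fun j => pvCondA x j))).flatten) := by
  intro bs
  induction bs with
  | nil => intro d x; simp
  | cons b bs ih =>
    intro d x
    have hd1 : ∀ y, (pvStepA event d b).getD y (0, []) =
        if y = b then ((d.getD b (0, [])).1 + 1, (d.getD b (0, [])).2 ++ event.filter (fun j => pvCondA b j))
        else d.getD y (0, []) := by
      intro y
      simp only [pvStepA]
      cases hg : d.get? b with
      | none =>
        have hz : d.getD b (0, []) = (0, []) := by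
          rw [PySem.Dict.getD_eq_get?_getD, hg]; rfl
        rw [pvInnerA_getD]
        by_cases hy : y = b
        · subst hy
          rw [if_pos rfl, if_pos rfl, PySem.Dict.getD_insert, if_pos rfl, hz]
          simp
        · rw [if_neg hy, if_neg hy, PySem.Dict.getD_insert, if_neg hy]
      | some p =>
        have hp : d.getD b (0, []) = p := by
          rw [PySem.Dict.getD_eq_get?_getD, hg]; rfl
        rw [pvInnerA_getD]
        by_cases hy : y = b
        · subst hy
          rw [if_pos rfl, if_pos rfl, PySem.Dict.getD_insert, if_pos rfl, hp]
        · rw [if_neg hy, if_neg hy, PySem.Dict.getD_insert, if_neg hy]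
    rw [List.foldl_cons, ih, hd1 x]
    by_cases hx : x = b
    · subst hx
      rw [if_pos rfl, List.count_cons_self, List.replicate_succ, List.flatten_cons]
      simp only [Prod.mk.injEq]
      constructor
      · push_cast; ring
      · rw [List.append_assoc]
    · rw [if_neg hx]
      have hc : (b :: bs).count x = bs.count x := by
        rw [List.count_cons]; simp [Ne.symm hx]
      rw [hc]

theorem pvBuildFold_keys (event : List String) : ∀ (bs : List String) (d : PySem.Dict String (Int × List String)),
    (bs.foldl (pvStepA event) d).keys = PySem.Set.update d.keys bs := by
  intro bs
  induction bs with
  | nil => intro d; simp [PySem.Set.update_nil]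
  | cons b bs ih =>
    intro d
    rw [List.foldl_cons, ih, PySem.Set.update_cons]
    congr 1
    rw [pvStepA]
    cases hg : d.get? b with
    | none =>
      have hnc : d.contains b = false := by
        rw [PySem.Dict.contains_eq_isSome_get?, hg]; rfl
      rw [pvInnerA_keys _ _ _ (by rw [PySem.Dict.contains_insert_self]),
        PySem.Dict.keys_insert_of_not_contains _ _ hnc,
        PySem.Set.add_eq_ite]
      rw [if_neg (by rw [← PySem.Dict.contains_iff_mem_keys]; simp [hnc])]
    | some p =>
      have hc : d.contains b = true := by
        rw [PySem.Dict.contains_eq_isSome_get?, hg]; rfl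
      rw [pvInnerA_keys _ _ _ (by rw [PySem.Dict.contains_insert_self]),
        PySem.Dict.keys_insert_of_contains _ _ hc,
        PySem.Set.add_eq_ite]
      rw [if_pos ((PySem.Dict.contains_iff_mem_keys _ _).mp hc)]

theorem pvBuildA_keys (event banned : List String) :
    (pvBuildA event banned).keys = PySem.Set.ofList banned := by
  rw [pvBuildA_eq_foldl, pvBuildFold_keys]
  simp [PySem.Dict.keys_empty, PySem.Set.update_nil_left]

-- ---- combinations lemmas ----
theorem pvCombA_mem : ∀ (k : ℕ) (xs c : List String), c ∈ pvCombA k xs ↔ c.Sublist xs ∧ c.length = k := by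
  intro k xs
  induction xs generalizing k with
  | nil =>
    cases k with
    | zero => intro c; simp [pvCombA, List.sublist_nil]
    | succ k =>
      intro c
      simp only [pvCombA, List.not_mem_nil, false_iff, not_and, List.sublist_nil]
      rintro rfl; simp
  | cons x xs ih =>
    cases k with
    | zero =>
      intro c
      simp only [pvCombA, List.mem_singleton]
      constructor
      · rintro rfl; exact ⟨List.nil_sublist _, rfl⟩
      · rintro ⟨-, h⟩; exact List.eq_nil_of_length_eq_zero h
    | succ k =>
      intro c
      simp only [pvCombA, List.mem_append, List.mem_map, ih, List.sublist_cons_iff]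
      constructor
      · rintro (⟨c', ⟨hs, hl⟩, rfl⟩ | ⟨hs, hl⟩)
        · exact ⟨Or.inr ⟨c', rfl, hs⟩, by simp [hl]⟩
        · exact ⟨Or.inl hs, hl⟩
      · rintro ⟨hs | ⟨r, rfl, hr⟩, hl⟩
        · exact Or.inr ⟨hs, hl⟩
        · exact Or.inl ⟨r, ⟨hr, by simpa using hl⟩, rfl⟩

theorem pvCombA_nil_of_lt : ∀ (xs : List String) (k : ℕ), xs.length < k → pvCombA k xs = [] := by
  intro xs k h
  rcases List.eq_nil_or_concat (pvCombA k xs) with hnil | ⟨l, c, hc⟩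
  · exact hnil
  · exfalso
    have hm : c ∈ pvCombA k xs := by simp [hc]
    rw [pvCombA_mem] at hm
    have := hm.1.length_le
    omega

theorem pvCombA_full : ∀ (xs : List String), pvCombA xs.length xs = [xs] := by
  intro xs
  induction xs with
  | nil => rfl
  | cons x xs ih =>
    simp only [List.length_cons, pvCombA, ih, List.map_cons, List.map_nil]
    rw [pvCombA_nil_of_lt _ _ (by omega)]
    simp

-- ---- the removal loop is a filter ----
theorem pvRemoveLoop (ans : List String) : ∀ (s : List String),
    (ans.foldl (fun n i => if PySem.Set.contains n i then ((PySem.Set.remove? n i).getD n) else n) s)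
      = s.filter (fun y => !decide (y ∈ ans)) := by
  induction ans with
  | nil => intro s; simp
  | cons i ans ih =>
    intro s
    have hstep : (if PySem.Set.contains s i then ((PySem.Set.remove? s i).getD s) else s)
        = s.filter (fun y => !(y == i)) := by
      by_cases hc : PySem.Set.contains s i = true
      · have hm : i ∈ s := by
          simpa [PySem.Set.contains_eq_listContains, List.elem_iff] using hc
        simp [PySem.Set.remove?, PySem.Set.discard, hm]
      · simp only [Bool.not_eq_true] at hc
        have hm : i ∉ s := by simpa using hc
        rw [if_neg (by rw [hc]; simp), eq_comm, List.filter_eq_self]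
        intro y hy
        have hne : y ≠ i := fun h => hm (h ▸ hy)
        simp [hne]

    simp only [List.foldl_cons, hstep, ih, List.filter_filter]
    apply List.filter_congr
    intro y hy
    simp [beq_eq_decide, Bool.and_comm]

-- ---- A's dfs computes pvTG ----
def pvKV (d : PySem.Dict String (Int × List String)) (key : String) : Finset String × ℕ :=
  ((PySem.Set.ofList (d.getD key (0, [])).2).toFinset, (d.getD key (0, [])).1.toNat)

theorem pvOfList_toFinset (t : List String) : (PySem.Set.ofList t).toFinset = t.toFinset := by
  ext x; simp [PySem.Set.mem_ofList]

theorem pvUnionInsertAbsorb (X Y : Finset (Finset String)) (a : Finset String) (h : a ∈ X) :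
    X ∪ insert a Y = X ∪ Y := by
  ext S; simp only [Finset.mem_union, Finset.mem_insert]
  constructor
  · rintro (hS | rfl | hS)
    · exact Or.inl hS
    · exact Or.inl h
    · exact Or.inr hS
  · tauto

def pvUnionOver (cs : List (List String)) (g : List String → Finset (Finset String)) :
    Finset (Finset String) := cs.foldr (fun c acc => g c ∪ acc) ∅

theorem pvMemUnionOver (cs : List (List String)) (g : List String → Finset (Finset String))
    (S : Finset String) : S ∈ pvUnionOver cs g ↔ ∃ c ∈ cs, S ∈ g c := by
  induction cs with
  | nil => simp [pvUnionOver]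
  | cons c cs ih =>
    simp only [pvUnionOver, List.foldr_cons] at ih ⊢
    simp only [Finset.mem_union, ih, List.mem_cons]
    constructor
    · rintro (h | ⟨c', hc', hS⟩)
      · exact ⟨c, Or.inl rfl, h⟩
      · exact ⟨c', Or.inr hc', hS⟩
    · rintro ⟨c', rfl | hc', hS⟩
      · exact Or.inl hS
      · exact Or.inr ⟨c', hc', hS⟩

theorem pvDfsA_cons_eq (d : PySem.Dict String (Int × List String)) (key : String)
    (rest ans : List String) (target : List (List String))
    (hk1 : 1 ≤ (d.getD key (0, [])).1) :
    pvDfsA d (key :: rest) ans target =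
      (pvCombA (d.getD key (0, [])).1.toNat
          ((PySem.Set.ofList (d.getD key (0, [])).2).filter (fun y => !decide (y ∈ ans)))).foldl
        (fun t c => pvDfsA d rest (ans ++ c) t) target := by
  simp only [pvDfsA]
  rw [pvRemoveLoop]
  by_cases hc : (d.getD key (0, [])).1 ≠
      (((PySem.Set.ofList (d.getD key (0, [])).2).filter (fun y => !decide (y ∈ ans))).length : Int)
  · rw [if_pos hc]
  · rw [if_neg hc]
    push_neg at hc
    have hnt : (d.getD key (0, [])).1.toNat
        = ((PySem.Set.ofList (d.getD key (0, [])).2).filter (fun y => !decide (y ∈ ans))).length := by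
      rw [hc]; exact Int.toNat_natCast _
    by_cases hl0 : ((PySem.Set.ofList (d.getD key (0, [])).2).filter (fun y => !decide (y ∈ ans))).length ≠ 0
    · rw [if_pos hl0, hnt, pvCombA_full]
      rfl
    · rw [if_neg hl0]
      push_neg at hl0
      have hne : (PySem.Set.ofList (d.getD key (0, [])).2).filter (fun y => !decide (y ∈ ans)) = [] :=
        List.eq_nil_of_length_eq_zero hl0
      rw [hne, pvCombA_nil_of_lt _ _ (by simp only [List.length_nil]; omega)]
      rfl

theorem pvDfsA_spec (d : PySem.Dict String (Int × List String)) :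
    ∀ (rest : List String) (ans : List String) (target : List (List String)),
      (∀ key ∈ rest, 1 ≤ (d.getD key (0, [])).1) → pvPNe target →
      pvPNe (pvDfsA d rest ans target) ∧
      pvAsF (pvDfsA d rest ans target) = pvAsF target ∪ pvTG (rest.map (pvKV d)) ans.toFinset := by
  intro rest
  induction rest with
  | nil =>
    intro ans target h hp
    simp only [pvDfsA, List.map_nil]
    by_cases hmem : target.any (fun s => PySem.Set.equal s (PySem.Set.ofList ans)) = true
    · rw [if_pos hmem]
      refine ⟨hp, ?_⟩
      simp only [List.any_eq_true] at hmem
      obtain ⟨s, hs, hseq⟩ := hmem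
      have hsf : s.toFinset = ans.toFinset := by
        ext x
        have := (PySem.Set.equal_iff s (PySem.Set.ofList ans)).mp hseq x
        simp only [List.mem_toFinset]
        rw [this, PySem.Set.mem_ofList]
      have hmem2 : ans.toFinset ∈ pvAsF target := by
        rw [← hsf]
        simp only [pvAsF, List.mem_toFinset, List.mem_map]
        exact ⟨s, hs, rfl⟩
      rw [pvTG]
      have : ({ans.toFinset} : Finset (Finset String)) = insert ans.toFinset ∅ := by simp
      rw [this, pvUnionInsertAbsorb _ _ _ hmem2, Finset.union_empty]
    · rw [if_neg hmem]
      constructor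
      · rw [pvPNe, List.pairwise_append]
        refine ⟨hp, List.pairwise_singleton _ _, ?_⟩
        intro s hs u hu
        rw [List.mem_singleton] at hu
        subst hu
        intro hcontra
        apply hmem
        simp only [List.any_eq_true]
        refine ⟨s, hs, ?_⟩
        rw [PySem.Set.equal_iff]
        intro x
        rw [← List.mem_toFinset, hcontra, List.mem_toFinset]
      · rw [pvTG]
        simp only [pvAsF, List.map_append, List.map_cons, List.map_nil, List.toFinset_append,
          List.toFinset_cons, List.toFinset_nil, pvOfList_toFinset]
        ext S
        simp only [Finset.mem_union, Finset.mem_insert, Finset.mem_singleton]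
        tauto
  | cons key rest ihrest =>
    intro ans target h hp
    have hk1 : 1 ≤ (d.getD key (0, [])).1 := h key List.mem_cons_self
    have hrest : ∀ k ∈ rest, 1 ≤ (d.getD k (0, [])).1 := fun k hk => h k (List.mem_cons_of_mem _ hk)
    rw [pvDfsA_cons_eq d key rest ans target hk1]
    have hnodup : ((PySem.Set.ofList (d.getD key (0, [])).2).filter (fun y => !decide (y ∈ ans))).Nodup :=
      List.Nodup.filter _ (PySem.Set.nodup_ofList _)
    have hfold : ∀ (cs : List (List String)) (target : List (List String)), pvPNe target →
        pvPNe (cs.foldl (fun t c => pvDfsA d rest (ans ++ c) t) target) ∧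
        pvAsF (cs.foldl (fun t c => pvDfsA d rest (ans ++ c) t) target)
          = pvAsF target ∪ pvUnionOver cs (fun c => pvTG (rest.map (pvKV d)) ((ans ++ c).toFinset)) := by
      intro cs
      induction cs with
      | nil => intro target hp2; exact ⟨hp2, by simp [pvUnionOver]⟩
      | cons c cs ihc =>
        intro target hp2
        rw [List.foldl_cons]
        obtain ⟨hp3, ha3⟩ := ihrest (ans ++ c) target hrest hp2
        obtain ⟨hp4, ha4⟩ := ihc _ hp3
        refine ⟨hp4, ?_⟩
        rw [ha4, ha3]
        simp only [pvUnionOver, List.foldr_cons]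
        rw [Finset.union_assoc]
    obtain ⟨hp5, ha5⟩ := hfold _ target hp
    refine ⟨hp5, ?_⟩
    rw [ha5]
    congr 1
    rw [List.map_cons]
    show _ = pvTG (pvKV d key :: rest.map (pvKV d)) ans.toFinset
    simp only [pvTG, pvKV]
    apply Finset.ext
    intro S
    rw [pvMemUnionOver]
    simp only [Finset.mem_biUnion, Finset.mem_powersetCard]
    have hseteq : ((PySem.Set.ofList (d.getD key (0, [])).2).filter (fun y => !decide (y ∈ ans))).toFinset
        = (PySem.Set.ofList (d.getD key (0, [])).2).toFinset \ ans.toFinset := by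
      ext x
      simp [Finset.mem_sdiff]
    constructor
    · rintro ⟨c, hc, hS⟩
      rw [pvCombA_mem] at hc
      refine ⟨c.toFinset, ⟨?_, ?_⟩, ?_⟩
      · rw [← hseteq]
        intro x hx
        rw [List.mem_toFinset] at hx ⊢
        exact hc.1.subset hx
      · rw [List.toFinset_card_of_nodup (List.Sublist.nodup hc.1 hnodup), hc.2]
      · rwa [List.toFinset_append] at hS
    · rintro ⟨s, ⟨hsub, hcard⟩, hS⟩
      rw [← hseteq] at hsub
      refine ⟨((PySem.Set.ofList (d.getD key (0, [])).2).filter (fun y => !decide (y ∈ ans))).filter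
          (fun y => decide (y ∈ s)), ?_, ?_⟩
      · rw [pvCombA_mem]
        refine ⟨List.filter_sublist, ?_⟩
        have hcf : (((PySem.Set.ofList (d.getD key (0, [])).2).filter (fun y => !decide (y ∈ ans))).filter
            (fun y => decide (y ∈ s))).toFinset = s := by
          ext x
          simp only [List.mem_toFinset, List.mem_filter, decide_eq_true_eq]
          constructor
          · rintro ⟨-, hx⟩; exact hx
          · intro hx
            have := hsub hx
            rw [List.mem_toFinset, List.mem_filter] at this
            exact ⟨this, hx⟩
        have hnd2 : (((PySem.Set.ofList (d.getD key (0, [])).2).filter (fun y => !decide (y ∈ ans))).filter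
            (fun y => decide (y ∈ s))).Nodup := List.Nodup.filter _ hnodup
        rw [← List.toFinset_card_of_nodup hnd2, hcf, hcard]
      · rw [List.toFinset_append]
        have hcf : (((PySem.Set.ofList (d.getD key (0, [])).2).filter (fun y => !decide (y ∈ ans))).filter
            (fun y => decide (y ∈ s))).toFinset = s := by
          ext x
          simp only [List.mem_toFinset, List.mem_filter, decide_eq_true_eq]
          constructor
          · rintro ⟨-, hx⟩; exact hx
          · intro hx
            have := hsub hx
            rw [List.mem_toFinset, List.mem_filter] at this
            exact ⟨this, hx⟩
        rw [hcf]
        exact hS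

-- ---- B's fold computes pvTG ----
theorem pvProdB_length : ∀ (cs : List (List String)) (t : List String), t ∈ pvProdB cs → t.length = cs.length := by
  intro cs
  induction cs with
  | nil => intro t ht; simp only [pvProdB, List.mem_singleton] at ht; simp [ht]
  | cons c cs ih =>
    intro t ht
    simp only [pvProdB, List.mem_flatMap, List.mem_map] at ht
    obtain ⟨u, -, t', ht', rfl⟩ := ht
    simp [ih t' ht']

theorem pvTG_singletons_mem : ∀ (cs : List (List String)) (A : Finset String) (S : Finset String),
    S ∈ pvTG (cs.map (fun c => (c.toFinset, 1))) A ↔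
      ∃ t ∈ pvProdB cs, t.Nodup ∧ (∀ x ∈ t, x ∉ A) ∧ S = A ∪ t.toFinset := by
  intro cs
  induction cs with
  | nil =>
    intro A S
    simp only [List.map_nil, pvTG, Finset.mem_singleton, pvProdB, List.mem_singleton]
    constructor
    · rintro rfl; exact ⟨[], rfl, by simp⟩
    · rintro ⟨t, rfl, -, -, rfl⟩; simp
  | cons c cs ih =>
    intro A S
    simp only [List.map_cons, pvTG, Finset.mem_biUnion, Finset.mem_powersetCard]
    constructor
    · rintro ⟨s, ⟨hsub, hcard⟩, hS⟩
      obtain ⟨u, rfl⟩ := Finset.card_eq_one.mp hcard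
      have hu : u ∈ c.toFinset \ A := Finset.singleton_subset_iff.mp hsub
      rw [Finset.union_singleton] at hS
      rcases (ih (insert u A) S).mp hS with ⟨t, htmem, htnd, htdis, rfl⟩
      refine ⟨u :: t, ?_, ?_, ?_, ?_⟩
      · simp only [pvProdB, List.mem_flatMap, List.mem_map]
        refine ⟨u, ?_, t, htmem, rfl⟩
        have := (Finset.mem_sdiff.mp hu).1
        simpa using this
      · rw [List.nodup_cons]
        exact ⟨fun h => (htdis u h) (Finset.mem_insert_self u A), htnd⟩
      · intro x hx
        rcases List.mem_cons.mp hx with rfl | hx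
        · exact (Finset.mem_sdiff.mp hu).2
        · exact fun hA => (htdis x hx) (Finset.mem_insert_of_mem hA)
      · simp only [List.toFinset_cons]
        rw [Finset.union_insert, Finset.insert_union]
    · rintro ⟨t, htmem, htnd, htdis, rfl⟩
      simp only [pvProdB, List.mem_flatMap, List.mem_map] at htmem
      obtain ⟨u, hu, t', ht', rfl⟩ := htmem
      refine ⟨{u}, ⟨?_, Finset.card_singleton u⟩, ?_⟩
      · rw [Finset.singleton_subset_iff, Finset.mem_sdiff]
        exact ⟨by simpa using hu, htdis u List.mem_cons_self⟩
      · rw [Finset.union_singleton]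
        apply (ih (insert u A) _).mpr
        rw [List.nodup_cons] at htnd
        refine ⟨t', ht', htnd.2, ?_, ?_⟩
        · intro x hx hmem
          rcases Finset.mem_insert.mp hmem with rfl | hA
          · exact htnd.1 hx
          · exact htdis x (List.mem_cons_of_mem _ hx) hA
        · simp only [List.toFinset_cons]
          rw [Finset.union_insert, Finset.insert_union]

theorem pvFoldB_spec (n : ℕ) : ∀ (ts : List (List String)) (r : List (List String)), pvPNe r →
    pvPNe (ts.foldl (fun r t => if (PySem.Set.ofList t).length = n then pvAddFroB r (PySem.Set.ofList t) else r) r) ∧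
    pvAsF (ts.foldl (fun r t => if (PySem.Set.ofList t).length = n then pvAddFroB r (PySem.Set.ofList t) else r) r)
      = pvAsF r ∪ ((ts.filter (fun t => (PySem.Set.ofList t).length = n)).map List.toFinset).toFinset := by
  intro ts
  induction ts with
  | nil =>
    intro r hr
    exact ⟨hr, by simp [pvAsF]⟩
  | cons t ts ih =>
    intro r hr
    rw [List.foldl_cons]
    by_cases hg : (PySem.Set.ofList t).length = n
    · rw [if_pos hg]
      by_cases hmem : r.any (fun s => PySem.Set.equal s (PySem.Set.ofList t)) = true
      · have heq : pvAddFroB r (PySem.Set.ofList t) = r := by rw [pvAddFroB, if_pos hmem]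
        rw [heq]
        obtain ⟨hp, ha⟩ := ih r hr
        refine ⟨hp, ?_⟩
        rw [ha, List.filter_cons, if_pos (by simpa using hg)]
        simp only [List.map_cons, List.toFinset_cons]
        rw [pvUnionInsertAbsorb]
        simp only [List.any_eq_true] at hmem
        obtain ⟨s, hs, hseq⟩ := hmem
        have hsf : s.toFinset = t.toFinset := by
          ext x
          have := (PySem.Set.equal_iff s (PySem.Set.ofList t)).mp hseq x
          simp only [List.mem_toFinset]
          rw [this, PySem.Set.mem_ofList]
        rw [← hsf]
        simp only [pvAsF, List.mem_toFinset, List.mem_map]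
        exact ⟨s, hs, rfl⟩
      · have heq : pvAddFroB r (PySem.Set.ofList t) = r ++ [PySem.Set.ofList t] := by
          rw [pvAddFroB, if_neg hmem]
        rw [heq]
        have hr' : pvPNe (r ++ [PySem.Set.ofList t]) := by
          rw [pvPNe, List.pairwise_append]
          refine ⟨hr, List.pairwise_singleton _ _, ?_⟩
          intro s hs u hu
          rw [List.mem_singleton] at hu
          subst hu
          intro hcontra
          apply hmem
          simp only [List.any_eq_true]
          refine ⟨s, hs, ?_⟩
          rw [PySem.Set.equal_iff]
          intro x
          constructor
          · intro hx
            have : x ∈ s.toFinset := List.mem_toFinset.mpr hx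
            rw [hcontra] at this
            exact List.mem_toFinset.mp this
          · intro hx
            have : x ∈ (PySem.Set.ofList t).toFinset := List.mem_toFinset.mpr hx
            rw [← hcontra] at this
            exact List.mem_toFinset.mp this
        obtain ⟨hp, ha⟩ := ih _ hr'
        refine ⟨hp, ?_⟩
        rw [ha, List.filter_cons, if_pos (by simpa using hg)]
        simp only [pvAsF, List.map_append, List.map_cons, List.toFinset_cons, List.map_nil,
          List.toFinset_append]
        rw [pvOfList_toFinset]
        simp only [List.toFinset_nil]
        ext S
        simp only [Finset.mem_union, Finset.mem_insert]
        tauto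
    · rw [if_neg hg]
      obtain ⟨hp, ha⟩ := ih r hr
      refine ⟨hp, ?_⟩
      rw [ha, List.filter_cons, if_neg (by simpa using hg)]

-- ---- combinatorial core: ungrouping and permutation invariance of pvTG ----
theorem pvTG_swap_aux : ∀ (cx : Finset String) (kx : ℕ) (cy : Finset String) (ky : ℕ)
    (l : List (Finset String × ℕ)) (A : Finset String) (S : Finset String),
    S ∈ pvTG ((cx, kx) :: (cy, ky) :: l) A → S ∈ pvTG ((cy, ky) :: (cx, kx) :: l) A := by
  intro cx kx cy ky l A S h
  simp only [pvTG, Finset.mem_biUnion, Finset.mem_powersetCard] at h ⊢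
  obtain ⟨s, ⟨hs1, hs2⟩, t, ⟨ht1, ht2⟩, hS⟩ := h
  refine ⟨t, ⟨?_, ht2⟩, s, ⟨?_, hs2⟩, ?_⟩
  · exact ht1.trans (Finset.sdiff_subset_sdiff (le_refl cy) Finset.subset_union_left)
  · intro x hx
    have hxs := hs1 hx
    simp only [Finset.mem_sdiff, Finset.mem_union] at hxs ⊢
    refine ⟨hxs.1, ?_⟩
    rintro (hA | hT)
    · exact hxs.2 hA
    · have := ht1 hT
      simp only [Finset.mem_sdiff, Finset.mem_union] at this
      exact this.2 (Or.inr hx)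
  · rwa [Finset.union_right_comm]

theorem pvTG_congr_tail : ∀ (pre l l' : List (Finset String × ℕ)),
    (∀ A, pvTG l A = pvTG l' A) → ∀ A, pvTG (pre ++ l) A = pvTG (pre ++ l') A := by
  intro pre
  induction pre with
  | nil => intro l l' h A; exact h A
  | cons p pre ih =>
    intro l l' h A
    obtain ⟨c, k⟩ := p
    simp only [List.cons_append, pvTG]
    exact Finset.biUnion_congr rfl (fun s _ => ih l l' h _)

theorem pvTG_ungroup_one (c : Finset String) : ∀ (k : ℕ) (rest : List (Finset String × ℕ)) (A : Finset String),
    pvTG ((c, k) :: rest) A = pvTG (List.replicate k (c, 1) ++ rest) A := by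
  intro k
  induction k with
  | zero =>
    intro rest A
    simp only [pvTG, Finset.powersetCard_zero, List.replicate_zero, List.nil_append,
      Finset.singleton_biUnion, Finset.union_empty]
  | succ k ih =>
    intro rest A
    rw [List.replicate_succ, List.cons_append]
    show pvTG ((c, k + 1) :: rest) A = pvTG ((c, 1) :: (List.replicate k (c, 1) ++ rest)) A
    apply Finset.ext
    intro S
    simp only [pvTG, Finset.mem_biUnion, Finset.mem_powersetCard]
    constructor
    · rintro ⟨s, ⟨hsub, hcard⟩, hS⟩
      have hne : s.Nonempty := Finset.card_pos.mp (by omega)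
      obtain ⟨u, hu⟩ := hne
      refine ⟨{u}, ⟨Finset.singleton_subset_iff.mpr (hsub hu), Finset.card_singleton u⟩, ?_⟩
      rw [← ih rest (A ∪ {u})]
      simp only [pvTG, Finset.mem_biUnion, Finset.mem_powersetCard]
      refine ⟨s.erase u, ⟨?_, by rw [Finset.card_erase_of_mem hu]; omega⟩, ?_⟩
      · intro x hx
        have hxs := Finset.mem_of_mem_erase hx
        have hxu := Finset.ne_of_mem_erase hx
        have hmem := hsub hxs
        simp only [Finset.mem_sdiff, Finset.mem_union, Finset.mem_singleton] at hmem ⊢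
        exact ⟨hmem.1, by tauto⟩
      · have harg : A ∪ {u} ∪ s.erase u = A ∪ s := by
          rw [Finset.union_assoc]
          congr 1
          rw [Finset.singleton_union, Finset.insert_erase hu]
        rw [harg]; exact hS
    · rintro ⟨s1, ⟨hsub1, hcard1⟩, hS⟩
      obtain ⟨u, rfl⟩ := Finset.card_eq_one.mp hcard1
      rw [← ih rest (A ∪ {u})] at hS
      simp only [pvTG, Finset.mem_biUnion, Finset.mem_powersetCard] at hS
      obtain ⟨s', ⟨hsub', hcard'⟩, hS⟩ := hS
      have hu : u ∈ c \ A := Finset.singleton_subset_iff.mp hsub1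
      have hus' : u ∉ s' := by
        intro h
        have := hsub' h
        simp at this
      refine ⟨insert u s', ⟨?_, by rw [Finset.card_insert_of_notMem hus']; omega⟩, ?_⟩
      · intro x hx
        rcases Finset.mem_insert.mp hx with rfl | hx
        · exact hu
        · have := hsub' hx
          simp only [Finset.mem_sdiff, Finset.mem_union, Finset.mem_singleton] at this ⊢
          tauto
      · have harg : A ∪ insert u s' = A ∪ {u} ∪ s' := by
          rw [Finset.union_assoc, Finset.singleton_union]
        rw [harg]; exact hS

theorem pvTG_ungroup : ∀ (l : List (Finset String × ℕ)) (A : Finset String),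
    pvTG l A = pvTG (l.flatMap (fun p => List.replicate p.2 (p.1, 1))) A := by
  intro l
  induction l with
  | nil => intro A; rfl
  | cons p l ih =>
    intro A
    obtain ⟨c, k⟩ := p
    rw [List.flatMap_cons]
    rw [pvTG_ungroup_one]
    exact pvTG_congr_tail (List.replicate k (c, 1)) l _ (fun A => ih A) A

theorem pvTG_perm : ∀ {l l' : List (Finset String × ℕ)}, l.Perm l' → ∀ A, pvTG l A = pvTG l' A := by
  intro l l' hp
  induction hp with
  | nil => intro A; rfl
  | cons x h ih =>
    intro A
    obtain ⟨c, k⟩ := x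
    simp only [pvTG]
    exact Finset.biUnion_congr rfl (fun s _ => ih _)
  | swap x y l =>
    intro A
    obtain ⟨cx, kx⟩ := x
    obtain ⟨cy, ky⟩ := y
    apply Finset.ext
    intro S
    constructor
    · exact pvTG_swap_aux cy ky cx kx l A S
    · exact pvTG_swap_aux cx kx cy ky l A S
  | trans h1 h2 ih1 ih2 =>
    intro A
    rw [ih1 A, ih2 A]

theorem pvDiscard_ofList_filter (b : String) : ∀ (xs : List String),
    PySem.Set.discard (PySem.Set.ofList xs) b = PySem.Set.ofList (xs.filter (fun y => !(y == b))) := by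
  intro xs
  induction xs with
  | nil => rfl
  | cons x xs ih =>
    by_cases hx : x = b
    · subst hx
      simp only [PySem.Set.ofList_cons, PySem.Set.discard, List.filter_cons]
      simp only [BEq.rfl, Bool.not_true, List.filter_filter]
      rw [show (fun y => !(y == x) && !(y == x)) = (fun y => !(y == x)) by funext y; simp [Bool.and_self]]
      exact ih
    · have hb : (!(x == b)) = true := by simp [hx]
      simp only [PySem.Set.ofList_cons, PySem.Set.discard, List.filter_cons, hb, if_true]
      congr 1
      rw [← ih]
      simp only [PySem.Set.discard, List.filter_filter]
      apply List.filter_congr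
      intro y hy
      simp [Bool.and_comm]

theorem pvPerm_grouped : ∀ (n : ℕ) (bs : List String), bs.length ≤ n →
    ((PySem.Set.ofList bs).flatMap (fun x => List.replicate (bs.count x) x)).Perm bs := by
  intro n
  induction n with
  | zero =>
    intro bs h
    have : bs = [] := by cases bs with | nil => rfl | cons a l => simp at h
    subst this; simp
  | succ n ih =>
    intro bs h
    cases bs with
    | nil => simp
    | cons b bs2 =>
      rw [PySem.Set.ofList_cons, pvDiscard_ofList_filter]
      set l := bs2.filter (fun y => !(y == b)) with hl
      rw [List.flatMap_cons]
      have hcnt : ∀ x ∈ PySem.Set.ofList l, (b :: bs2).count x = l.count x := by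
        intro x hx
        have hxl : x ∈ l := by rwa [PySem.Set.mem_ofList] at hx
        have hxb : ¬ x = b := by
          have := List.of_mem_filter hxl
          simpa using this
        rw [List.count_cons, if_neg (by simpa using fun h => hxb h.symm), Nat.add_zero, hl, List.count_filter (by simpa using hxb)]
      have hcong : (PySem.Set.ofList l).flatMap (fun x => List.replicate ((b :: bs2).count x) x)
          = (PySem.Set.ofList l).flatMap (fun x => List.replicate (l.count x) x) := by
        apply List.flatMap_congr
        intro x hx
        rw [hcnt x hx]
      rw [hcong]
      have hperm : ((PySem.Set.ofList l).flatMap (fun x => List.replicate (l.count x) x)).Perm l := by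
        apply ih
        have h1 : l.length ≤ bs2.length := List.length_filter_le _ _
        simp only [List.length_cons] at h
        omega
      have hcount : (b :: bs2).count b = bs2.count b + 1 := by
        simp
      rw [hcount, List.replicate_succ, List.cons_append]
      apply List.Perm.cons
      refine List.Perm.trans (List.Perm.append_left _ hperm) ?_
      rw [hl, ← List.filter_beq b]
      exact List.filter_append_perm _ bs2

-- ---- counting ----
theorem pvAsF_card (r : List (List String)) (h : pvPNe r) : (pvAsF r).card = r.length := by
  have hnd : (r.map List.toFinset).Nodup := by
    unfold List.Nodup
    rw [List.pairwise_map]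
    exact h
  rw [pvAsF, List.toFinset_card_of_nodup hnd, List.length_map]

theorem pvNodupIffCard (t : List String) : t.toFinset.card = t.length ↔ t.Nodup := by
  constructor
  · intro h
    rw [List.card_toFinset] at h
    have hs : t.dedup.Sublist t := List.dedup_sublist t
    rw [← hs.eq_of_length h]
    exact List.nodup_dedup t
  · intro h
    exact List.toFinset_card_of_nodup h

theorem pvFlattenRep_toFinset (n : ℕ) (L : List String) (hn : 1 ≤ n) :
    ((List.replicate n L).flatten).toFinset = L.toFinset := by
  ext y
  simp only [List.mem_toFinset, List.mem_flatten, List.mem_replicate]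
  constructor
  · rintro ⟨l, ⟨-, rfl⟩, hy⟩; exact hy
  · intro hy; exact ⟨L, ⟨by omega, rfl⟩, hy⟩

-- ===== VERDICT (by name: the statement is the Claim_ definition above) =====
theorem solution_spec : Claim_equal_solution := by
  unfold Claim_equal_solution
  intro event banned _
  unfold Spec_solution
  simp only [solution, solution_alt]
  set d := pvBuildA event banned with hd
  have hkeys : d.keys = PySem.Set.ofList banned := pvBuildA_keys event banned
  have hget : ∀ x, d.getD x (0, []) =
      ((banned.count x : Int),
       (List.replicate (banned.count x) (event.filter (fun j => pvCondA x j))).flatten) := by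
    intro x
    rw [hd, pvBuildA_eq_foldl, pvBuildFold_getD]
    simp
  have hcts : ∀ key ∈ d.keys, 1 ≤ (d.getD key (0, [])).1 := by
    intro key hk
    rw [hget]
    rw [hkeys, PySem.Set.mem_ofList] at hk
    have h1 : 1 ≤ banned.count key := List.count_pos_iff.mpr hk
    exact (by exact_mod_cast h1 : (1 : Int) ≤ (banned.count key : Int))
  obtain ⟨hpA, haA⟩ := pvDfsA_spec d d.keys [] [] hcts List.Pairwise.nil
  rw [show ((pvDfsA d d.keys ([] : List String) ([] : List (PySem.Set String))).length : Int)
      = ((pvAsF (pvDfsA d d.keys [] [])).card : Int) by rw [pvAsF_card _ hpA]]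
  rw [haA]
  have hAempty : pvAsF ([] : List (List String)) = ∅ := by simp [pvAsF]
  rw [hAempty, Finset.empty_union, List.toFinset_nil]
  -- B side
  obtain ⟨hpB, haB⟩ := pvFoldB_spec banned.length (pvProdB (pvCandsB event banned)) [] List.Pairwise.nil
  rw [show (((pvProdB (pvCandsB event banned)).foldl (fun r t =>
        if (PySem.Set.ofList t).length = banned.length then pvAddFroB r (PySem.Set.ofList t) else r)
        ([] : List (PySem.Set String))).length : Int)
      = ((pvAsF ((pvProdB (pvCandsB event banned)).foldl (fun r t =>
        if (PySem.Set.ofList t).length = banned.length then pvAddFroB r (PySem.Set.ofList t) else r)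
        [])).card : Int) by rw [pvAsF_card _ hpB]]
  rw [haB, hAempty, Finset.empty_union]
  -- it suffices that the two Finsets of Finsets are equal
  congr 1
  congr 1
  -- rewrite the A-side slot list
  have hmapA : d.keys.map (pvKV d)
      = d.keys.map (fun key => ((event.filter (fun j => pvCondA key j)).toFinset, banned.count key)) := by
    apply List.map_congr_left
    intro key hk
    rw [hkeys, PySem.Set.mem_ofList] at hk
    have hc1 : 1 ≤ banned.count key := List.count_pos_iff.mpr hk
    rw [pvKV, hget]
    simp only [Int.toNat_natCast]
    rw [pvOfList_toFinset, pvFlattenRep_toFinset _ _ hc1]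
  rw [hmapA, pvTG_ungroup,
    List.flatMap_map (fun key => ((event.filter (fun j => pvCondA key j)).toFinset, banned.count key))
      (fun p => List.replicate p.2 (p.1, 1)) d.keys]
  have hrep : (fun key => List.replicate (banned.count key)
        ((event.filter (fun j => pvCondA key j)).toFinset, (1 : ℕ)))
      = (fun key => (List.replicate (banned.count key) key).map
          (fun b => ((event.filter (fun j => pvCondA b j)).toFinset, (1 : ℕ)))) := by
    funext key
    rw [List.map_replicate]
  rw [show (d.keys.flatMap fun key => List.replicate (banned.count key)
        ((event.filter (fun j => pvCondA key j)).toFinset, (1 : ℕ)))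
      = (d.keys.flatMap (fun key => List.replicate (banned.count key) key)).map
          (fun b => ((event.filter (fun j => pvCondA b j)).toFinset, (1 : ℕ))) by
    rw [List.map_flatMap]
    rw [hrep]]
  have hperm := (pvPerm_grouped banned.length banned le_rfl).map
      (fun b => ((event.filter (fun j => pvCondA b j)).toFinset, (1 : ℕ)))
  rw [hkeys, pvTG_perm hperm]
  -- B-side set equals the same pvTG
  have hcandmap : (pvCandsB event banned).map (fun c => ((c : List String).toFinset, (1 : ℕ)))
      = banned.map (fun b => ((event.filter (fun j => pvCondA b j)).toFinset, (1 : ℕ))) := by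
    rw [pvCandsB, List.map_map]
    apply List.map_congr_left
    intro b _
    simp only [Function.comp]
    rw [pvOfList_toFinset]
    congr 2
    apply List.filter_congr
    intro e _
    rw [pvCondA_eq_matchB]
  ext S
  rw [← hcandmap, pvTG_singletons_mem]
  simp only [List.mem_toFinset, List.mem_map, List.mem_filter]
  constructor
  · rintro ⟨t, ht, htnd, -, rfl⟩
    refine ⟨t, ⟨ht, ?_⟩, ?_⟩
    · rw [decide_eq_true_eq]
      have hlen : t.length = banned.length := by
        rw [pvProdB_length _ t ht, pvCandsB, List.length_map]
      rw [show (PySem.Set.ofList t).length = t.toFinset.card by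
          rw [← pvOfList_toFinset t]
          exact (List.toFinset_card_of_nodup (PySem.Set.nodup_ofList t)).symm]
      rw [(pvNodupIffCard t).mpr htnd, hlen]
    · rw [Finset.empty_union]
  · rintro ⟨t, ⟨ht, hgood⟩, rfl⟩
    rw [decide_eq_true_eq] at hgood
    have hlen : t.length = banned.length := by
      rw [pvProdB_length _ t ht, pvCandsB, List.length_map]
    have hcard : t.toFinset.card = t.length := by
      rw [← pvOfList_toFinset t, List.toFinset_card_of_nodup (PySem.Set.nodup_ofList t), hgood, hlen]
    refine ⟨t, ht, (pvNodupIffCard t).mp hcard, by simp, ?_⟩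
    rw [Finset.empty_union]
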